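-- pv_equiv track=rewrite | github.com/stevelid/wordAIreviewer | reviewer_agent.py | is_markdown_separator_line
-- ===== SOURCE A (Python) =====
-- def is_markdown_separator_line(line):
--     body = line.strip()
--     if not body.startswith("|"):
--         return False
--     body = body.strip("|").replace(" ", "")
--     if not body:
--         return False
--     return all(ch in "-:" for ch in body)
-- ===== SOURCE B (Python) =====
-- def is_markdown_separator_line(line):
--     # Single left-to-right state-machine pass over the stripped line:
--     # state 0 = expecting the first '|', 1 = in leading pipes,
--     # 2 = in the body (spaces/'-'/':'), 3 = in trailing pipes.
--     state = 0
--     seen = False  # saw at least one '-' or ':'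
--     for ch in line.strip():
--         if state == 0:
--             if ch != '|':
--                 return False
--             state = 1
--         elif state == 1:
--             if ch == '|':
--                 pass
--             elif ch in ' -:':
--                 seen = seen or ch in '-:'
--                 state = 2
--             else:
--                 return False
--         elif state == 2:
--             if ch == '|':
--                 state = 3
--             elif ch in ' -:':
--                 seen = seen or ch in '-:'
--             else:
--                 return False
--         else:
--             if ch != '|':
--                 return False
--     return seen
-- ===== Notes on version B (the rewrite author's own statement) =====
-- stated objective: alternative
-- what changed: Replaces A's multi-pass pipeline (strip, strip of pipes, space removal, then an all-scan) with a single left-to-right state-machine pass over the stripped line.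
import Mathlib
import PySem

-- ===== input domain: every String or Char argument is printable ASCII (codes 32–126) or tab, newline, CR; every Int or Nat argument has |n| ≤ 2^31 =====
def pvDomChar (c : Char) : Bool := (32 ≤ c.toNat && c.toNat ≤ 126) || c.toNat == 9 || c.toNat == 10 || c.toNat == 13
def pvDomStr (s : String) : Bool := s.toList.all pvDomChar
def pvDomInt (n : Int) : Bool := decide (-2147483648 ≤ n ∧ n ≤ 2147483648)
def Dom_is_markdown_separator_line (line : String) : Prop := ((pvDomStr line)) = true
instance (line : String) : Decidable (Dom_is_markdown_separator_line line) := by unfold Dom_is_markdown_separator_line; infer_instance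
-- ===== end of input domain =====

-- B replaces A's strip('|')/replace/all multi-pass pipeline with a single state-machine pass
-- over the stripped line (alternative decomposition; same asymptotic cost).


-- ===== PORT A =====
-- literal transliteration of A: body = line.strip(); startswith '|'; strip('|'); replace(' ',''); all(ch in "-:")
-- ('ch in "-:"' for a single character ch is exactly list membership in ['-', ':'])
def is_markdown_separator_line (line : String) : Bool :=
  let body := PySem.Str.strip line
  if !(PySem.Str.startswith body "|") then false
  else
    let body2 := PySem.Str.replace (PySem.Str.stripChars body "|") " " ""
    if PySem.Str.len body2 = 0 then false
    else body2.toList.all (fun ch => ['-', ':'].contains ch)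

-- ===== PORT B =====
-- transliteration of B's for-loop: state/seen carried through the recursion, early `return False` = false
def altLoop : List Char → Nat → Bool → Bool
  | [], _, seen => seen
  | c :: cs, state, seen =>
    if state = 0 then
      if c ≠ '|' then false else altLoop cs 1 seen
    else if state = 1 then
      if c = '|' then altLoop cs 1 seen
      else if c = ' ' ∨ c = '-' ∨ c = ':' then altLoop cs 2 (seen || (c = '-' || c = ':'))
      else false
    else if state = 2 then
      if c = '|' then altLoop cs 3 seen
      else if c = ' ' ∨ c = '-' ∨ c = ':' then altLoop cs 2 (seen || (c = '-' || c = ':'))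
      else false
    else
      if c ≠ '|' then false else altLoop cs 3 seen

def is_markdown_separator_line_alt (line : String) : Bool :=
  altLoop (PySem.Str.strip line).toList 0 false

-- ===== PRECONDITION & SPEC =====
def Spec_is_markdown_separator_line (line : String) (out : Bool) : Prop := out = is_markdown_separator_line_alt line
instance (line : String) (out : Bool) : Decidable (Spec_is_markdown_separator_line line out) := by unfold Spec_is_markdown_separator_line; infer_instance

-- ===== CLAIM (what is proved, stated in full; the proofs are below) =====
def Claim_equal_is_markdown_separator_line : Prop := ∀ (line : String), Dom_is_markdown_separator_line line → Spec_is_markdown_separator_line line (is_markdown_separator_line line)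

-- ===== LEMMAS AND PROOFS =====

-- Python's str.replace(' ', '') is filtering out spaces
lemma replace_go_space (fuel : Nat) : ∀ (l acc : List Char), l.length ≤ fuel →
    PySem.Chars.replace.go [' '] [] fuel l acc = acc.reverse ++ l.filter (· != ' ') := by
  induction fuel with
  | zero => intro l acc h; cases l with
    | nil => simp [PySem.Chars.replace.go]
    | cons c t => simp at h
  | succ n ih =>
    intro l acc h
    cases l with
    | nil => simp [PySem.Chars.replace.go]
    | cons c t =>
      by_cases hc : c = ' '
      · subst hc
        have : List.isPrefixOf [' '] (' ' :: t) = true := by simp [List.isPrefixOf]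
        simp only [PySem.Chars.replace.go, this, if_pos]
        have hdrop : List.drop [' '].length (' ' :: t) = t := rfl
        rw [hdrop, ih t _ (by simpa using Nat.le_of_succ_le_succ h)]
        simp
      · have : List.isPrefixOf [' '] (c :: t) = false := by
          simp [List.isPrefixOf]; exact fun hc' => hc hc'.symm
        simp only [PySem.Chars.replace.go, this]
        rw [ih t (c :: acc) (by simpa using Nat.le_of_succ_le_succ h)]
        simp [hc]

lemma replace_space (l : List Char) :
    PySem.Chars.replace l [' '] [] = l.filter (· != ' ') := by
  have := replace_go_space l.length l [] (le_refl _)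
  simpa [PySem.Chars.replace] using this

-- rdropWhile on a cons whose head fails the predicate
lemma rdropWhile_cons_neg {p : Char → Bool} {c : Char} (cs : List Char) (hc : p c = false) :
    List.rdropWhile p (c :: cs) = c :: List.rdropWhile p cs := by
  unfold List.rdropWhile
  rw [List.reverse_cons, List.dropWhile_append]
  by_cases h : List.dropWhile p cs.reverse = []
  · simp [h, hc]
  · simp [h]

-- state 3: only trailing pipes are accepted
lemma altLoop_three (cs : List Char) (seen : Bool) :
    altLoop cs 3 seen = (cs.all (· == '|') && seen) := by
  induction cs with
  | nil => simp [altLoop]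
  | cons c t ih =>
    by_cases hc : c = '|'
    · subst hc; simpa [altLoop] using ih
    · simp [altLoop, hc]

-- state 1 skips the leading pipes and behaves as state 2
lemma altLoop_one (cs : List Char) (seen : Bool) :
    altLoop cs 1 seen = altLoop (cs.dropWhile (· == '|')) 2 seen := by
  induction cs with
  | nil => simp [altLoop]
  | cons c t ih =>
    by_cases hc : c = '|'
    · subst hc; simpa [altLoop] using ih
    · simp only [List.dropWhile_cons, show ((c == '|') = false) by simp [hc]]
      simp [altLoop, hc]

-- state 2 characterised: body (up to trailing pipes) is spaces/dashes/colons with a dash/colon seen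
lemma altLoop_two (cs : List Char) (seen : Bool) :
    altLoop cs 2 seen =
      ((List.rdropWhile (· == '|') cs).all (fun c => c == ' ' || c == '-' || c == ':') &&
       (seen || (List.rdropWhile (· == '|') cs).any (fun c => c == '-' || c == ':'))) := by
  induction cs generalizing seen with
  | nil => simp [altLoop]
  | cons c t ih =>
    by_cases hc : c = '|'
    · subst hc
      by_cases hall : t.all (· == '|')
      · have hnil : List.rdropWhile (· == '|') ('|' :: t) = [] := by
          rw [List.rdropWhile_eq_nil_iff]
          intro x hx
          rw [List.mem_cons] at hx
          rcases hx with rfl | hx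
          · simp
          · exact (List.all_eq_true.mp hall) x hx
        simp [altLoop, altLoop_three, hnil, hall]
      · have hne : List.rdropWhile (· == '|') ('|' :: t) ≠ [] := by
          rw [Ne, List.rdropWhile_eq_nil_iff]
          intro h
          exact hall (List.all_eq_true.mpr (fun x hx => h x (List.mem_cons_of_mem _ hx)))
        have hmem : '|' ∈ List.rdropWhile (· == '|') ('|' :: t) := by
          rcases List.rdropWhile_prefix (· == '|') ('|' :: t) with ⟨u, hu⟩
          cases hm : List.rdropWhile (· == '|') ('|' :: t) with
          | nil => exact absurd hm hne
          | cons y ys =>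
            rw [hm] at hu
            have h3 : y = '|' := by simpa using congrArg List.head? hu
            simp [h3]
        have hfail : (List.rdropWhile (· == '|') ('|' :: t)).all
            (fun c => c == ' ' || c == '-' || c == ':') = false := by
          rw [List.all_eq_false]
          exact ⟨'|', hmem, by decide⟩
        simp [altLoop, altLoop_three, hfail, hall]
    · rw [rdropWhile_cons_neg t (by simp [hc])]
      by_cases hin : c = ' ' ∨ c = '-' ∨ c = ':'
      · have hstep : altLoop (c :: t) 2 seen = altLoop t 2 (seen || (c = '-' || c = ':')) := by
          simp [altLoop, hc, hin]
        rw [hstep, ih]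
        rcases hin with h | h | h <;> subst h <;> simp
      · have h1 : altLoop (c :: t) 2 seen = false := by
          simp [altLoop, hc, hin]
        have h2 : ((c :: List.rdropWhile (· == '|') t).all
            (fun c => c == ' ' || c == '-' || c == ':')) = false := by
          rw [not_or, not_or] at hin
          simp [hin.1, hin.2.1, hin.2.2]
        simp [h1, h2]

-- A's tail condition equals the all/any characterisation
lemma filter_all_char (m : List Char) :
    (if m.filter (· != ' ') = [] then false
     else (m.filter (· != ' ')).all (fun ch => ['-', ':'].contains ch)) =
      (m.all (fun c => c == ' ' || c == '-' || c == ':') &&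
       m.any (fun c => c == '-' || c == ':')) := by
  by_cases hall : m.all (fun c => c == ' ' || c == '-' || c == ':') = true
  · have hfall : (m.filter (· != ' ')).all (fun ch => ['-', ':'].contains ch) = true := by
      rw [List.all_eq_true]
      intro x hx
      have hmem := List.mem_of_mem_filter hx
      have hne : (x != ' ') = true := (List.mem_filter.mp hx).2
      have hok := (List.all_eq_true.mp hall) x hmem
      simp at hok hne ⊢
      tauto
    by_cases hnil : m.filter (· != ' ') = []
    · have hany : m.any (fun c => c == '-' || c == ':') = false := by
        rw [List.any_eq_false]
        intro x hxm
        have hsp := List.filter_eq_nil_iff.mp hnil x hxm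
        simp at hsp
        simp [hsp]
      rw [if_pos hnil, hall, hany]
      simp
    · obtain ⟨x, hx⟩ := List.exists_mem_of_ne_nil _ hnil
      have hxm := List.mem_of_mem_filter hx
      have hxne : (x != ' ') = true := (List.mem_filter.mp hx).2
      have hx2 := (List.all_eq_true.mp hall) x hxm
      have hany : m.any (fun c => c == '-' || c == ':') = true := by
        rw [List.any_eq_true]
        refine ⟨x, hxm, ?_⟩
        simp at hx2 hxne ⊢
        tauto
      rw [if_neg hnil, hfall, hall, hany]
      simp
  · have hallf : m.all (fun c => c == ' ' || c == '-' || c == ':') = false := by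
      simpa using hall
    obtain ⟨x, hxm, hxf⟩ := List.all_eq_false.mp hallf
    have hxne : (x != ' ') = true := by
      simp at hxf ⊢
      tauto
    have hxfil : x ∈ m.filter (· != ' ') := List.mem_filter.mpr ⟨hxm, hxne⟩
    have hnil : m.filter (· != ' ') ≠ [] := by
      intro h
      rw [h] at hxfil
      simp at hxfil
    have hfall : (m.filter (· != ' ')).all (fun ch => ['-', ':'].contains ch) = false := by
      rw [List.all_eq_false]
      refine ⟨x, hxfil, ?_⟩
      simp at hxf ⊢
      tauto
    rw [if_neg hnil, hfall, hallf]
    simp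

-- predicates used by stripChars and by the DFA coincide
lemma contains_pipe_eq : (fun c => List.contains ['|'] c) = (fun c : Char => c == '|') := by
  funext c
  by_cases h : c = '|' <;> simp [h]

-- the whole equivalence, phrased on the stripped character list
lemma core (l : List Char) :
    (if !(PySem.Chars.startswith l ['|']) then false
     else
       let body2 := PySem.Chars.replace (PySem.Chars.stripChars l ['|']) [' '] []
       if body2.length = 0 then false
       else body2.all (fun ch => ['-', ':'].contains ch)) = altLoop l 0 false := by
  cases l with
  | nil => simp [PySem.Chars.startswith, altLoop, List.isPrefixOf]
  | cons c t =>
    by_cases hc : c = '|'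
    · subst hc
      have hpref : PySem.Chars.startswith ('|' :: t) ['|'] = true := by
        simp [PySem.Chars.startswith, List.isPrefixOf]
      have hstrip : PySem.Chars.stripChars ('|' :: t) ['|'] =
          List.rdropWhile (· == '|') (t.dropWhile (· == '|')) := by
        show (List.dropWhile _ (List.dropWhile _ ('|' :: t)).reverse).reverse = _
        rw [contains_pipe_eq]
        rw [List.dropWhile_cons_of_pos (by simp)]
        rfl
      simp only [hpref, Bool.not_true, Bool.false_eq_true, if_false, hstrip]
      rw [replace_space]
      rw [show (altLoop ('|' :: t) 0 false) = altLoop t 1 false from by simp [altLoop]]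
      rw [altLoop_one, altLoop_two]
      have := filter_all_char (List.rdropWhile (· == '|') (t.dropWhile (· == '|')))
      simp only [List.length_eq_zero_iff] at *
      simpa using this
    · have hpref : PySem.Chars.startswith (c :: t) ['|'] = false := by
        simp [PySem.Chars.startswith, List.isPrefixOf]
        exact fun h => hc h.symm
      simp [hpref, altLoop, hc]

-- ===== VERDICT (by name: the statement is the Claim_ definition above) =====
theorem is_markdown_separator_line_spec : Claim_equal_is_markdown_separator_line := by
  intro line _
  unfold Spec_is_markdown_separator_line is_markdown_separator_line is_markdown_separator_line_alt
  rw [← core (PySem.Str.strip line).toList]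
  simp [PySem.Str.len_eq, List.length_eq_zero_iff]
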